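-- pv_equiv track=rewrite | github.com/Pajdzik/Mishmash | leetcode.com/maximum-number-of-moves-in-a-grid.py | maxMoves_bfs
-- ===== SOURCE A (Python) =====
-- from typing import List
--
-- def maxMoves_bfs(grid: List[List[int]]) -> int:
--     def find_next_steps(row: int, col: int) -> List[int]:
--         steps = []
--         for row_delta in [-1, 0, 1]:
--             next_row = row + row_delta
--             if not 0 <= next_row < len(grid):
--                 continue
--             next_col = col + 1
--             if not 0 <= next_col < len(grid[0]):
--                 continue
--
--             curr_value = grid[row][col]
--             next_value = grid[next_row][next_col]
--
--             if next_value > curr_value: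
--                 steps.append((next_row, next_col))
--
--         return steps
--
--     def traverse() -> int:
--         max_single_path = 0
--         queue = [(r, 0, -1) for r in range(len(grid))]
--         visited = [[False for _ in range(len(grid[0]))] for _ in range(len(grid))]
--
--         while queue:
--             row, col, length = queue.pop(0)
--             if visited[row][col]:
--                 continue
--             visited[row][col] = True
--             next_steps = find_next_steps(row, col)
--             max_single_path = max(max_single_path, length + 1)
--             queue.extend([(r, c, length + 1) for (r, c) in next_steps])
--
--         return max_single_path
--
--     result = traverse()
--
--     return result
-- ===== SOURCE B (Python) =====
-- from typing import List
--
-- def maxMoves_bfs(grid: List[List[int]]) -> int: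
--     m = len(grid)
--     n = len(grid[0]) if grid else 0
--     reachable = [True] * m
--     moves = 0
--     for col in range(1, n):
--         new = []
--         for r in range(m):
--             ok = False
--             for pr in (r - 1, r, r + 1):
--                 if 0 <= pr < m and reachable[pr] and grid[r][col] > grid[pr][col - 1]:
--                     ok = True
--                     break
--             new.append(ok)
--         if not any(new):
--             break
--         reachable = new
--         moves = col
--     return moves
-- ===== Notes on version B (the rewrite author's own statement) =====
-- stated objective: faster
-- what changed: A's FIFO breadth-first search with a visited matrix and O(queue.length) list.pop(0) is replaced by a single left-to-right dynamic program that propagates a per-row boolean reachability vector column by column and stops at the first column no row can reach.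
-- outside the precondition, e.g. on maxMoves_bfs([[5], []]): A returns 0, B returns 0
import Mathlib
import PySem

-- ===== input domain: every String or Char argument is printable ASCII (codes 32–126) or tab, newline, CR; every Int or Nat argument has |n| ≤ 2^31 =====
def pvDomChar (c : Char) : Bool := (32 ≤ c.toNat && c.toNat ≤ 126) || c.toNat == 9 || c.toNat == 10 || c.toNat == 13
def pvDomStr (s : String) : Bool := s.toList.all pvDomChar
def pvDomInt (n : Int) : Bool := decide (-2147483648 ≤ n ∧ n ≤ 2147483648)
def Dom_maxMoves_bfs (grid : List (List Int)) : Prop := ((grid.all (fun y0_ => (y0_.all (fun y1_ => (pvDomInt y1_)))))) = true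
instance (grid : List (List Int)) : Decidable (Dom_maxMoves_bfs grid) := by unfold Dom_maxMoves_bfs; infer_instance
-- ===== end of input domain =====

-- B replaces A's FIFO breadth-first search (with a visited matrix and O(queue) pops)
-- by a single left-to-right dynamic program propagating a per-row reachability vector
-- column by column; equal on Pre_ (nonempty rectangular-enough grids).

-- ===== PORT A =====
-- grid value at (r, c); A only indexes after its own 0 ≤ _ < len checks, so inside
-- Pre_ the 0 default is never observed.
def cellVal (grid : List (List Int)) (r c : Nat) : Int := (grid.getD r []).getD c 0

-- A's find_next_steps: loop over row_delta in [-1, 0, 1]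
def nextSteps (grid : List (List Int)) (m n : Nat) (row col : Nat) : List (Nat × Nat) :=
  ([-1, 0, 1] : List Int).foldl (fun steps d =>
    let nr : Int := (row : Int) + d
    if 0 ≤ nr ∧ nr < (m : Int) then
      if col + 1 < n then
        if cellVal grid nr.toNat (col + 1) > cellVal grid row col then
          steps ++ [(nr.toNat, col + 1)]
        else steps
      else steps
    else steps) []

-- used by the ports' termination measures (cited in decreasing_by)
lemma nextSteps_length_le (grid : List (List Int)) (m n row col : Nat) :
    (nextSteps grid m n row col).length ≤ 3 := by
  simp only [nextSteps, List.foldl]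
  split_ifs <;> simp

-- visited[r][c]; out-of-range reads as True (A never reads out of range inside Pre_)
def visGet (v : List (List Bool)) (r c : Nat) : Bool := (v.getD r []).getD c true
def setTrue (v : List (List Bool)) (r c : Nat) : List (List Bool) :=
  v.set r ((v.getD r []).set c true)
def countFalse (v : List (List Bool)) : Nat := (v.map (fun row => row.count false)).sum

lemma count_set_true : ∀ (l : List Bool) (c : Nat), l.getD c true = false →
    (l.set c true).count false + 1 = l.count false := by
  intro l
  induction l with
  | nil => intro c h; simp [List.getD] at h
  | cons b t ih =>
    intro c h
    cases c with
    | zero =>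
      have hb : b = false := by simpa using h
      subst hb; simp
    | succ c =>
      have h' := ih c (by simpa using h)
      cases b <;> simp only [List.set_cons_succ, List.count_cons] <;> simp <;> omega

lemma countFalse_setTrue : ∀ (v : List (List Bool)) (r c : Nat),
    visGet v r c = false → countFalse (setTrue v r c) + 1 = countFalse v := by
  intro v
  induction v with
  | nil => intro r c h; simp [visGet, List.getD] at h
  | cons row t ih =>
    intro r c h
    cases r with
    | zero =>
      have h0 : row.getD c true = false := by simpa [visGet] using h
      have := count_set_true row c h0
      simp only [setTrue, countFalse, List.getD_cons_zero, List.set_cons_zero,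
        List.map_cons, List.sum_cons]
      omega
    | succ r =>
      have h1 : visGet t r c = false := by simpa [visGet] using h
      have := ih r c h1
      simp only [setTrue, countFalse, List.getD_cons_succ, List.set_cons_succ,
        List.map_cons, List.sum_cons] at this ⊢
      omega

-- A's while-queue loop
def bfsLoop (grid : List (List Int)) (m n : Nat)
    (queue : List (Nat × Nat × Int)) (visited : List (List Bool)) (best : Int) : Int :=
  match queue with
  | [] => best
  | (row, col, length) :: rest =>
    if h : visGet visited row col then bfsLoop grid m n rest visited best
    else
      bfsLoop grid m n
        (rest ++ (nextSteps grid m n row col).map (fun s => (s.1, s.2, length + 1)))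
        (setTrue visited row col) (max best (length + 1))
termination_by queue.length + 4 * countFalse visited
decreasing_by
  · simp only [List.length_cons]; omega
  · have h1 := nextSteps_length_le grid m n row col
    have h2 := countFalse_setTrue visited row col (by simpa using h)
    simp only [List.length_append, List.length_map, List.length_cons]
    omega

def maxMoves_bfs (grid : List (List Int)) : Int :=
  let m := grid.length
  let n := (grid.headD []).length
  bfsLoop grid m n ((List.range m).map (fun r => (r, 0, (-1 : Int))))
    ((List.range m).map (fun _ => (List.range n).map (fun _ => false))) 0

-- ===== PORT B =====
-- can row r at column col be stepped into from some reachable row of column col-1?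
def rowOk (grid : List (List Int)) (m : Nat) (reachable : List Bool) (col r : Nat) : Bool :=
  (((r : Int) - 1) :: (r : Int) :: ((r : Int) + 1) :: []).any (fun pr =>
    decide (0 ≤ pr) && decide (pr < (m : Int)) && reachable.getD pr.toNat false &&
      decide (cellVal grid pr.toNat (col - 1) < cellVal grid r col))

-- B's for-col loop with early break
def bLoop (grid : List (List Int)) (m : Nat) (cols : List Nat)
    (reachable : List Bool) (moves : Int) : Int :=
  match cols with
  | [] => moves
  | col :: rest =>
    let new := (List.range m).map (fun r => rowOk grid m reachable col r)
    if new.any id then bLoop grid m rest new (col : Int) else moves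

def maxMoves_bfs_alt (grid : List (List Int)) : Int :=
  bLoop grid grid.length (List.range' 1 ((grid.headD []).length - 1))
    (List.replicate grid.length true) 0

-- ===== PRECONDITION & SPEC =====
-- Pre_ excludes the inputs where Python A raises IndexError: a nonempty grid whose
-- first row is empty, and grids with a row shorter than the first row (a short row
-- that A's search happens never to probe makes A return; one cited example below).
def Pre_maxMoves_bfs (grid : List (List Int)) : Prop :=
  (grid ≠ [] → 0 < (grid.headD []).length) ∧
    ∀ row ∈ grid, (grid.headD []).length ≤ row.length
instance (grid : List (List Int)) : Decidable (Pre_maxMoves_bfs grid) := by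
  unfold Pre_maxMoves_bfs; infer_instance

def pvWitness_maxMoves_bfs : List (List Int) := [[1, 2], [3, 4]]

def Spec_maxMoves_bfs (grid : List (List Int)) (out : Int) : Prop := out = maxMoves_bfs_alt grid
instance (grid : List (List Int)) (out : Int) : Decidable (Spec_maxMoves_bfs grid out) := by
  unfold Spec_maxMoves_bfs; infer_instance

-- ===== CLAIM (what is proved, stated in full; the proofs are below) =====
def Claim_equal_maxMoves_bfs : Prop := ∀ (grid : List (List Int)), Dom_maxMoves_bfs grid → Pre_maxMoves_bfs grid → Spec_maxMoves_bfs grid (maxMoves_bfs grid)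
-- ===== LEMMAS AND PROOFS =====

lemma mem_nextSteps_col {grid : List (List Int)} {m n row col : Nat} {s : Nat × Nat}
    (h : s ∈ nextSteps grid m n row col) : s.2 = col + 1 ∧ col + 1 < n := by
  simp only [nextSteps, List.foldl] at h
  split_ifs at h <;> simp_all <;> rcases h with rfl | rfl | rfl <;> simp

-- fold-max toolbox
lemma le_fmax_base {α : Type} (g : α → Int) (b : Int) (l : List α) :
    b ≤ l.foldr (fun x acc => max (g x) acc) b := by
  induction l with
  | nil => simp
  | cons x t ih => exact le_trans ih (le_max_right _ _)

lemma le_fmax_mem {α : Type} (g : α → Int) (b : Int) {l : List α} {x : α} (hx : x ∈ l) :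
    g x ≤ l.foldr (fun x acc => max (g x) acc) b := by
  induction l with
  | nil => cases hx
  | cons y t ih =>
    rcases List.mem_cons.1 hx with h | h
    · subst h; exact le_max_left _ _
    · exact le_trans (ih h) (le_max_right _ _)

lemma fmax_le {α : Type} {g : α → Int} {b K : Int} {l : List α} (hb : b ≤ K)
    (hl : ∀ x ∈ l, g x ≤ K) : l.foldr (fun x acc => max (g x) acc) b ≤ K := by
  induction l with
  | nil => simpa using hb
  | cons x t ih =>
    simp only [List.foldr_cons]
    exact max_le (hl x (by simp)) (ih (fun y hy => hl y (List.mem_cons_of_mem _ hy)))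

lemma fmax_congr {α : Type} {g g' : α → Int} {b : Int} {l : List α}
    (h : ∀ x ∈ l, g x = g' x) :
    l.foldr (fun x acc => max (g x) acc) b = l.foldr (fun x acc => max (g' x) acc) b := by
  induction l with
  | nil => rfl
  | cons x t ih =>
    simp only [List.foldr_cons]
    rw [h x (by simp), ih (fun y hy => h y (List.mem_cons_of_mem _ hy))]

-- the "potential" of a cell: the largest column index reachable from (r, c) along
-- strictly increasing steps whose cells avoid vis (0 if (r, c) itself is in vis)
def hFun (grid : List (List Int)) (m n : Nat) (vis : Nat → Nat → Bool) (r c : Nat) : Int :=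
  if vis r c then 0
  else ((nextSteps grid m n r c).attach).foldr
      (fun s acc => max (hFun grid m n vis s.1.1 s.1.2) acc) (c : Int)
termination_by n - c
decreasing_by
  obtain ⟨h1, h2⟩ := mem_nextSteps_col s.2
  omega

lemma hFun_of_vis {grid : List (List Int)} {m n : Nat} {vis : Nat → Nat → Bool} {r c : Nat}
    (h : vis r c = true) : hFun grid m n vis r c = 0 := by
  rw [hFun]; simp [h]

lemma hFun_of_not_vis {grid : List (List Int)} {m n : Nat} {vis : Nat → Nat → Bool} {r c : Nat}
    (h : vis r c = false) :
    hFun grid m n vis r c = (nextSteps grid m n r c).foldr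
      (fun s acc => max (hFun grid m n vis s.1 s.2) acc) (c : Int) := by
  rw [hFun]
  simp only [h, Bool.false_eq_true, if_false]
  exact List.foldr_attach (l := nextSteps grid m n r c)
    (f := fun s acc => max (hFun grid m n vis s.1 s.2) acc) (b := (c : Int))

lemma hFun_nonneg (grid : List (List Int)) (m n : Nat) (vis : Nat → Nat → Bool) (r c : Nat) :
    0 ≤ hFun grid m n vis r c := by
  by_cases h : vis r c
  · rw [hFun_of_vis h]
  · rw [hFun_of_not_vis (by simpa using h)]
    exact le_trans (by positivity) (le_fmax_base _ _ _)

lemma hFun_ge_base {grid : List (List Int)} {m n : Nat} {vis : Nat → Nat → Bool} {r c : Nat}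
    (h : vis r c = false) : (c : Int) ≤ hFun grid m n vis r c := by
  rw [hFun_of_not_vis h]; exact le_fmax_base _ _ _

lemma hFun_succ_le {grid : List (List Int)} {m n : Nat} {vis : Nat → Nat → Bool} {r c : Nat}
    {s : Nat × Nat} (hs : s ∈ nextSteps grid m n r c) (h : vis r c = false) :
    hFun grid m n vis s.1 s.2 ≤ hFun grid m n vis r c := by
  rw [hFun_of_not_vis h]
  exact le_fmax_mem _ _ hs

-- hFun only reads vis at columns ≥ c
lemma hFun_agree (grid : List (List Int)) (m n : Nat) :
    ∀ (k : Nat) (vis vis' : Nat → Nat → Bool) (r c : Nat), n - c ≤ k →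
      (∀ r' c', c ≤ c' → vis r' c' = vis' r' c') →
      hFun grid m n vis r c = hFun grid m n vis' r c := by
  intro k
  induction k with
  | zero =>
    intro vis vis' r c hk hagree
    have hc : n ≤ c := by omega
    have hv := hagree r c le_rfl
    by_cases h : vis r c
    · rw [hFun_of_vis h, hFun_of_vis (hv ▸ h)]
    · have h' : vis r c = false := by simpa using h
      rw [hFun_of_not_vis h', hFun_of_not_vis (hv ▸ h')]
      apply fmax_congr
      intro s hs
      exact absurd (mem_nextSteps_col hs).2 (by omega)
  | succ k ih =>
    intro vis vis' r c hk hagree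
    have hv := hagree r c le_rfl
    by_cases h : vis r c
    · rw [hFun_of_vis h, hFun_of_vis (hv ▸ h)]
    · have h' : vis r c = false := by simpa using h
      rw [hFun_of_not_vis h', hFun_of_not_vis (hv ▸ h')]
      apply fmax_congr
      intro s hs
      obtain ⟨hcol, hlt⟩ := mem_nextSteps_col hs
      rw [hcol]
      exact ih vis vis' s.1 (c + 1) (by omega) (fun r' c' hc' => hagree r' c' (by omega))

-- a larger vis yields a smaller potential
lemma hFun_mono (grid : List (List Int)) (m n : Nat) :
    ∀ (k : Nat) (vis vis' : Nat → Nat → Bool) (r c : Nat), n - c ≤ k →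
      (∀ r' c', vis r' c' = true → vis' r' c' = true) →
      hFun grid m n vis' r c ≤ hFun grid m n vis r c := by
  intro k
  induction k with
  | zero =>
    intro vis vis' r c hk hsub
    by_cases h : vis' r c
    · rw [hFun_of_vis h]; exact hFun_nonneg _ _ _ _ _ _
    · have h' : vis' r c = false := by simpa using h
      have hv : vis r c = false := by
        by_contra hv
        exact absurd (hsub r c (by simpa using hv)) (by simp [h'])
      rw [hFun_of_not_vis h', hFun_of_not_vis hv]
      apply fmax_le (le_fmax_base _ _ _)
      intro s hs
      exact absurd (mem_nextSteps_col hs).2 (by omega)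
  | succ k ih =>
    intro vis vis' r c hk hsub
    by_cases h : vis' r c
    · rw [hFun_of_vis h]; exact hFun_nonneg _ _ _ _ _ _
    · have h' : vis' r c = false := by simpa using h
      have hv : vis r c = false := by
        by_contra hv
        exact absurd (hsub r c (by simpa using hv)) (by simp [h'])
      rw [hFun_of_not_vis h']
      apply fmax_le (hFun_ge_base hv)
      intro s hs
      obtain ⟨hcol, hlt⟩ := mem_nextSteps_col hs
      calc hFun grid m n vis' s.1 s.2 ≤ hFun grid m n vis s.1 s.2 := by
            rw [hcol]; exact ih vis vis' s.1 (c + 1) (by omega) hsub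
        _ ≤ hFun grid m n vis r c := hFun_succ_le hs hv

-- adding one cell (x, y) to vis lowers a potential by at most the potential of (x, y)
lemma hFun_bound (grid : List (List Int)) (m n : Nat) :
    ∀ (k : Nat) (vis vis2 : Nat → Nat → Bool) (x y : Nat), 
      (∀ r' c', vis2 r' c' = ((decide (r' = x) && decide (c' = y)) || vis r' c')) →
      ∀ (r c : Nat), n - c ≤ k →
      hFun grid m n vis r c ≤ max (hFun grid m n vis2 r c) (hFun grid m n vis x y) := by
  intro k
  induction k with
  | zero =>
    intro vis vis2 x y hvis2 r c hk
    by_cases h : vis r c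
    · rw [hFun_of_vis h]
      exact le_trans (hFun_nonneg grid m n vis2 r c) (le_max_left _ _)
    · have h' : vis r c = false := by simpa using h
      by_cases hxy : r = x ∧ c = y
      · obtain ⟨rfl, rfl⟩ := hxy
        exact le_max_right _ _
      · have h2 : vis2 r c = false := by
          rw [hvis2]; simp only [h', Bool.or_false]
          rcases Decidable.not_and_iff_or_not.1 hxy with h | h <;> simp [h]
        rw [hFun_of_not_vis h', hFun_of_not_vis h2]
        apply fmax_le (le_trans (le_fmax_base _ _ _) (le_max_left _ _))
        intro s hs
        exact absurd (mem_nextSteps_col hs).2 (by omega)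
  | succ k ih =>
    intro vis vis2 x y hvis2 r c hk
    by_cases h : vis r c
    · rw [hFun_of_vis h]
      exact le_trans (hFun_nonneg grid m n vis2 r c) (le_max_left _ _)
    · have h' : vis r c = false := by simpa using h
      by_cases hxy : r = x ∧ c = y
      · obtain ⟨rfl, rfl⟩ := hxy
        exact le_max_right _ _
      · have h2 : vis2 r c = false := by
          rw [hvis2]; simp only [h', Bool.or_false]
          rcases Decidable.not_and_iff_or_not.1 hxy with h | h <;> simp [h]
        rw [hFun_of_not_vis h']
        apply fmax_le (le_trans (hFun_ge_base h2) (le_max_left _ _))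
        intro s hs
        obtain ⟨hcol, hlt⟩ := mem_nextSteps_col hs
        have hrec := ih vis vis2 x y hvis2 s.1 s.2 (by omega)
        have hstep : hFun grid m n vis2 s.1 s.2 ≤ hFun grid m n vis2 r c := hFun_succ_le hs h2
        exact le_trans hrec (max_le (le_trans hstep (le_max_left _ _)) (le_max_right _ _))

-- update rule of the visited matrix, as seen through visGet
lemma visGet_setTrue {v : List (List Bool)} {r c : Nat} (h : visGet v r c = false)
    (r' c' : Nat) :
    visGet (setTrue v r c) r' c' = ((decide (r' = r) && decide (c' = c)) || visGet v r' c') := by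
  have hr : r < v.length := by
    by_contra hr
    rw [visGet, List.getD_eq_getElem?_getD (l := v), List.getElem?_eq_none (by omega)] at h
    simp [List.getD] at h
  have hc : c < (v.getD r []).length := by
    by_contra hc
    rw [visGet, List.getD_eq_getElem?_getD (l := v.getD r []),
      List.getElem?_eq_none (by omega)] at h
    simp at h
  by_cases hrr : r' = r
  · subst hrr
    have hrow : (setTrue v r' c).getD r' [] = (v.getD r' []).set c true := by
      rw [setTrue, List.getD_eq_getElem?_getD, List.getElem?_set_self hr]
      rfl
    by_cases hcc : c' = c
    · subst hcc
      rw [visGet, hrow, List.getD_eq_getElem?_getD,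
        List.getElem?_set_self (by simpa using hc)]
      simp
    · rw [visGet, hrow, List.getD_eq_getElem?_getD,
        List.getElem?_set_ne (by omega), ← List.getD_eq_getElem?_getD]
      simp [visGet, hcc]
  · have hrow : (setTrue v r c).getD r' [] = v.getD r' [] := by
      rw [setTrue, List.getD_eq_getElem?_getD, List.getElem?_set_ne (by omega),
        ← List.getD_eq_getElem?_getD]
    rw [visGet, hrow]
    simp [visGet, hrr]

-- the BFS loop computes the running max of the potentials of its queue entries
lemma bfsLoop_eq (grid : List (List Int)) (m n : Nat) :
    ∀ (queue : List (Nat × Nat × Int)) (visited : List (List Bool)) (best : Int),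
      (∀ x ∈ queue, x.2.2 = (x.2.1 : Int) - 1) → 0 ≤ best →
      bfsLoop grid m n queue visited best =
        queue.foldr (fun x acc => max (hFun grid m n (visGet visited) x.1 x.2.1) acc) best := by
  intro queue visited best
  fun_induction bfsLoop grid m n queue visited best with
  | case1 visited best => intro _ _; rfl
  | case2 visited best row col length rest hvis ihr =>
    intro hq hb
    rw [ihr (fun x hx => hq x (List.mem_cons_of_mem _ hx)) hb]
    simp only [List.foldr_cons]
    rw [hFun_of_vis (by simpa using hvis)]
    have : (0 : Int) ≤ rest.foldr (fun x acc => max (hFun grid m n (visGet visited) x.1 x.2.1) acc) best :=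
      le_trans hb (le_fmax_base _ _ _)
    omega
  | case3 visited best row col length rest hvis ihr =>
    intro hq hb
    have hv : visGet visited row col = false := by simpa using hvis
    have hlen : length = (col : Int) - 1 := hq (row, col, length) (by simp)
    have hcol : length + 1 = (col : Int) := by omega
    set vis := visGet visited with hvisdef
    set vis' := visGet (setTrue visited row col) with hvis'def
    have hpt : ∀ r' c', vis' r' c' = ((decide (r' = row) && decide (c' = col)) || vis r' c') :=
      fun r' c' => visGet_setTrue hv r' c'
    -- rewrite the recursive call
    have hq' : ∀ x ∈ rest ++ (nextSteps grid m n row col).map (fun s => (s.1, s.2, length + 1)),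
        x.2.2 = (x.2.1 : Int) - 1 := by
      intro x hx
      rcases List.mem_append.1 hx with h | h
      · exact hq x (List.mem_cons_of_mem _ h)
      · obtain ⟨s, hs, rfl⟩ := List.mem_map.1 h
        obtain ⟨hc1, _⟩ := mem_nextSteps_col hs
        simp only [hc1] at *
        push_cast
        omega
    rw [ihr hq' (le_trans hb (le_max_left _ _))]
    rw [List.foldr_append, List.foldr_map]
    simp only [List.foldr_cons]
    -- abbreviations
    set steps := nextSteps grid m n row col with hsteps
    rw [hcol]
    set best' := max best (col : Int) with hbest'
    set E := steps.foldr (fun s acc => max (hFun grid m n vis' s.1 s.2) acc) best' with hE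
    -- the head's potential, expressed through vis'
    have hA : hFun grid m n vis row col =
        steps.foldr (fun s acc => max (hFun grid m n vis' s.1 s.2) acc) (col : Int) := by
      rw [hFun_of_not_vis hv]
      apply fmax_congr
      intro s hs
      obtain ⟨hc1, _⟩ := mem_nextSteps_col hs
      apply hFun_agree grid m n (n - s.2) vis vis' s.1 s.2 le_rfl
      intro r' c' hc'
      rw [hpt r' c']
      have : ¬ (c' = col) := by omega
      simp [this]
    apply le_antisymm
    · -- RHS ≤ LHS
      apply fmax_le
      · -- E ≤ LHS
        apply fmax_le
        · apply max_le
          · exact le_trans (le_fmax_base _ _ _) (le_max_right _ _)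
          · exact le_trans (hFun_ge_base hv) (le_max_left _ _)
        · intro s hs
          have : hFun grid m n vis' s.1 s.2 ≤ hFun grid m n vis row col := by
            rw [hA]; exact le_fmax_mem _ _ hs
          exact le_trans this (le_max_left _ _)
      · intro x hx
        have hmono := hFun_mono grid m n (n - x.2.1) vis vis' x.1 x.2.1 le_rfl
          (fun r' c' hrc => by rw [hpt r' c', hrc]; simp)
        exact le_trans hmono (le_trans (le_fmax_mem (g := fun x : Nat × Nat × Int => hFun grid m n vis x.1 x.2.1) _ hx) (le_max_right _ _))

    · -- LHS ≤ RHS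
      apply max_le
      · rw [hA]
        apply fmax_le
        · exact le_trans (le_trans (le_max_right best _) (le_fmax_base (g := fun s : Nat × Nat => hFun grid m n vis' s.1 s.2) best' steps))
            (le_fmax_base (g := fun x : Nat × Nat × Int => hFun grid m n vis' x.1 x.2.1) E rest)
        · intro s hs
          exact le_trans (le_fmax_mem (g := fun s : Nat × Nat => hFun grid m n vis' s.1 s.2) _ hs)
            (le_fmax_base (g := fun x : Nat × Nat × Int => hFun grid m n vis' x.1 x.2.1) E rest)
      · apply fmax_le
        · exact le_trans (le_trans (le_max_left best _) (le_fmax_base (g := fun s : Nat × Nat => hFun grid m n vis' s.1 s.2) best' steps))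
            (le_fmax_base (g := fun x : Nat × Nat × Int => hFun grid m n vis' x.1 x.2.1) E rest)
        · intro x hx
          have hbnd := hFun_bound grid m n (n - x.2.1) vis vis' row col hpt x.1 x.2.1 le_rfl
          apply le_trans hbnd
          apply max_le
          · exact le_fmax_mem (g := fun x : Nat × Nat × Int => hFun grid m n vis' x.1 x.2.1) _ hx
          · rw [hA]
            apply fmax_le
            · exact le_trans (le_trans (le_max_right best _) (le_fmax_base (g := fun s : Nat × Nat => hFun grid m n vis' s.1 s.2) best' steps))
                (le_fmax_base (g := fun x : Nat × Nat × Int => hFun grid m n vis' x.1 x.2.1) E rest)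
            · intro s hs
              exact le_trans (le_fmax_mem (g := fun s : Nat × Nat => hFun grid m n vis' s.1 s.2) _ hs)
                (le_fmax_base (g := fun x : Nat × Nat × Int => hFun grid m n vis' x.1 x.2.1) E rest)
-- the fresh visited matrix, seen through visGet
lemma visGet_init (m n r c : Nat) :
    visGet ((List.range m).map (fun _ => (List.range n).map (fun _ => false))) r c =
      !(decide (r < m) && decide (c < n)) := by
  by_cases hr : r < m
  · have : ((List.range m).map (fun _ => (List.range n).map (fun _ => false))).getD r [] =
        (List.range n).map (fun _ => false) := by
      rw [List.getD_eq_getElem?_getD, List.getElem?_map]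
      simp [List.getElem?_range hr]
    rw [visGet, this]
    by_cases hc : c < n
    · rw [List.getD_eq_getElem?_getD, List.getElem?_map]
      simp [hr, hc]
    · rw [List.getD_eq_getElem?_getD, List.getElem?_eq_none (by simpa using hc)]
      simp [hr, hc]
  · have : ((List.range m).map (fun _ => (List.range n).map (fun _ => false))).getD r [] = [] := by
      rw [List.getD_eq_getElem?_getD, List.getElem?_eq_none (by simpa using hr)]
      rfl
    rw [visGet, this]
    simp [List.getD, hr]

-- ===== B-side theory: column-by-column reachability =====

-- row r is reachable in column c from column 0 along strictly increasing steps
def reachB (grid : List (List Int)) (m n : Nat) : Nat → Nat → Bool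
  | 0, r => decide (r < m)
  | c + 1, r => decide (r < m) && decide (c + 1 < n) &&
      (((r : Int) - 1) :: (r : Int) :: ((r : Int) + 1) :: []).any (fun pr =>
        decide (0 ≤ pr) && decide (pr < (m : Int)) && reachB grid m n c pr.toNat &&
        decide (cellVal grid pr.toNat c < cellVal grid r (c + 1)))

lemma reachB_lt_m {grid : List (List Int)} {m n : Nat} :
    ∀ {c r : Nat}, reachB grid m n c r = true → r < m := by
  intro c r h
  cases c with
  | zero => simpa [reachB] using h
  | succ c => simp [reachB] at h; exact h.1.1

lemma reachB_col_lt {grid : List (List Int)} {m n : Nat} (hn : 0 < n) :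
    ∀ {c r : Nat}, reachB grid m n c r = true → c < n := by
  intro c r h
  cases c with
  | zero => exact hn
  | succ c => simp [reachB] at h; exact h.1.2

lemma nextSteps_sound {grid : List (List Int)} {m n row col : Nat} {s : Nat × Nat}
    (h : s ∈ nextSteps grid m n row col) :
    s.2 = col + 1 ∧ col + 1 < n ∧ s.1 < m ∧
      ((row : Int) - 1 ≤ (s.1 : Int) ∧ (s.1 : Int) ≤ (row : Int) + 1) ∧
      cellVal grid row col < cellVal grid s.1 (col + 1) := by
  simp only [nextSteps, List.foldl] at h
  split_ifs at h <;>
    simp only [List.mem_append, List.mem_singleton, List.not_mem_nil,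
      List.nil_append] at h <;>
    first
      | exact h.elim
      | (rcases h with (rfl | rfl) | rfl <;>
          exact ⟨rfl, by omega, by omega, ⟨by omega, by omega⟩, by assumption⟩)

lemma nextSteps_complete {grid : List (List Int)} {m n row col r : Nat}
    (hd : (r : Int) = (row : Int) - 1 ∨ (r : Int) = (row : Int) ∨ (r : Int) = (row : Int) + 1)
    (hrm : r < m) (hcn : col + 1 < n)
    (hval : cellVal grid row col < cellVal grid r (col + 1)) :
    (r, col + 1) ∈ nextSteps grid m n row col := by
  simp only [nextSteps, List.foldl]
  rcases hd with hd | hd | hd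
  · have hc1 : 0 ≤ (row : Int) + (-1) ∧ (row : Int) + (-1) < (m : Int) := by omega
    have hx : ((row : Int) + (-1)).toNat = r := by omega
    simp only [if_pos hc1, if_pos hcn, hx, if_pos hval]
    split_ifs <;> simp
  · have hc0 : 0 ≤ (row : Int) + 0 ∧ (row : Int) + 0 < (m : Int) := by omega
    have hx : ((row : Int) + 0).toNat = r := by omega
    simp only [if_pos hc0, if_pos hcn, hx, if_pos hval]
    split_ifs <;> simp
  · have hc2 : 0 ≤ (row : Int) + 1 ∧ (row : Int) + 1 < (m : Int) := by omega
    have hx : ((row : Int) + 1).toNat = r := by omega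
    simp only [if_pos hc2, if_pos hcn, hx, if_pos hval]
    split_ifs <;> simp

lemma reach_step {grid : List (List Int)} {m n row col : Nat} {s : Nat × Nat}
    (hs : s ∈ nextSteps grid m n row col) (hr : reachB grid m n col row = true) :
    reachB grid m n (col + 1) s.1 = true := by
  obtain ⟨hc2, hltn, hsm, hband, hval⟩ := nextSteps_sound hs
  have hrowm : row < m := reachB_lt_m hr
  simp only [reachB, Bool.and_eq_true, List.any_eq_true, decide_eq_true_eq]
  refine ⟨⟨by simpa using hsm, by simpa using hltn⟩, (row : Int), ?_, ?_⟩
  · simp only [List.mem_cons, List.not_mem_nil, or_false]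
    omega
  · simp only [Int.toNat_natCast]
    exact ⟨⟨⟨by omega, by exact_mod_cast hrowm⟩, hr⟩, hval⟩

lemma reach_back {grid : List (List Int)} {m n c r : Nat}
    (h : reachB grid m n (c + 1) r = true) :
    ∃ pr : Nat, reachB grid m n c pr = true ∧ (r, c + 1) ∈ nextSteps grid m n pr c := by
  simp only [reachB, Bool.and_eq_true, List.any_eq_true, decide_eq_true_eq] at h
  obtain ⟨⟨hrm, hcn⟩, pr, hmem, ⟨⟨⟨h0, hm⟩, hre⟩, hval⟩⟩ := h
  refine ⟨pr.toNat, hre, ?_⟩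
  apply nextSteps_complete (row := pr.toNat) ?_ hrm hcn ?_
  · simp only [List.mem_cons, List.not_mem_nil, or_false] at hmem
    omega
  · exact hval

lemma reachB_empty_above {grid : List (List Int)} {m n c : Nat}
    (h : ∀ r, reachB grid m n (c + 1) r = false) :
    ∀ d r, reachB grid m n (c + 1 + d) r = false := by
  intro d
  induction d with
  | zero => exact h
  | succ d ih =>
    intro r
    by_contra hr
    have hr' : reachB grid m n (c + 1 + d + 1) r = true := by
      have : c + 1 + (d + 1) = c + 1 + d + 1 := by omega
      rw [this] at hr
      simpa using hr
    obtain ⟨pr, hpr, _⟩ := reach_back hr'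
    exact absurd hpr (by simp [ih pr])

-- the all-unvisited predicate of the fresh visited matrix
def visZ (m n : Nat) : Nat → Nat → Bool := fun r c => !(decide (r < m) && decide (c < n))

lemma visZ_false {m n r c : Nat} (hr : r < m) (hc : c < n) : visZ m n r c = false := by
  simp [visZ, hr, hc]

lemma hFun_le_of_reach (grid : List (List Int)) (m n : Nat) (hn : 0 < n) (B : Int)
    (hB : ∀ c' r', reachB grid m n c' r' = true → (c' : Int) ≤ B) :
    ∀ (k c r : Nat), n - c ≤ k → reachB grid m n c r = true →
      hFun grid m n (visZ m n) r c ≤ B := by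
  intro k
  induction k with
  | zero =>
    intro c r hk hre
    exact absurd (reachB_col_lt hn hre) (by omega)
  | succ k ih =>
    intro c r hk hre
    have hv : visZ m n r c = false := visZ_false (reachB_lt_m hre) (reachB_col_lt hn hre)
    rw [hFun_of_not_vis hv]
    apply fmax_le (hB c r hre)
    intro s hs
    obtain ⟨hc2, hltn⟩ := mem_nextSteps_col hs
    have hre' := reach_step hs hre
    rw [hc2]
    exact ih (c + 1) s.1 (by omega) hre'

lemma reach_chain (grid : List (List Int)) (m n : Nat) (hn : 0 < n) :
    ∀ (c r : Nat), reachB grid m n c r = true →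
      ∃ r0, r0 < m ∧ hFun grid m n (visZ m n) r c ≤ hFun grid m n (visZ m n) r0 0 := by
  intro c
  induction c with
  | zero => intro r h; exact ⟨r, reachB_lt_m h, le_rfl⟩
  | succ c ih =>
    intro r h
    obtain ⟨pr, hpr, hmem⟩ := reach_back h
    obtain ⟨r0, hr0, hle⟩ := ih pr hpr
    have hv : visZ m n pr c = false :=
      visZ_false (reachB_lt_m hpr) (by have := reachB_col_lt hn h; omega)
    have hstep := hFun_succ_le (s := (r, c + 1)) hmem hv
    exact ⟨r0, hr0, le_trans hstep hle⟩

lemma any_congr_mem {α : Type} {l : List α} {f g : α → Bool}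
    (h : ∀ x ∈ l, f x = g x) : l.any f = l.any g := by
  induction l with
  | nil => rfl
  | cons x t ih =>
    simp only [List.any_cons]
    rw [h x (by simp), ih (fun y hy => h y (List.mem_cons_of_mem _ hy))]

-- the DP step of B computes reachability of the next column
lemma rowOk_eq {grid : List (List Int)} {m n : Nat} (c r : Nat) (hr : r < m)
    (hcn : c + 1 < n) :
    rowOk grid m ((List.range m).map (reachB grid m n c)) (c + 1) r =
      reachB grid m n (c + 1) r := by
  simp only [rowOk, reachB, Nat.add_sub_cancel]
  have h1 : decide (r < m) = true := by simp [hr]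
  have h2 : decide (c + 1 < n) = true := by simp [hcn]
  rw [h1, h2]
  simp only [Bool.true_and]
  apply any_congr_mem
  intro pr hpr
  by_cases h0 : 0 ≤ pr
  · by_cases hm1 : pr < (m : Int)
    · have hget : ((List.range m).map (reachB grid m n c)).getD pr.toNat false =
          reachB grid m n c pr.toNat := by
        rw [List.getD_eq_getElem?_getD, List.getElem?_map,
          List.getElem?_range (by omega)]
        rfl
      rw [hget]
    · simp [hm1]
  · simp [h0]

lemma map_reach0 (grid : List (List Int)) (m n : Nat) :
    (List.range m).map (reachB grid m n 0) = List.replicate m true := by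
  have h : ∀ r ∈ List.range m, reachB grid m n 0 r = true := by
    intro r hr
    simp [reachB, List.mem_range.1 hr]
  rw [List.map_congr_left h]
  simp [List.map_const']

-- B's loop returns the largest nonempty-reachable column
lemma bLoop_inv (grid : List (List Int)) (m n : Nat) (hn : 0 < n) :
    ∀ (len c : Nat), c < n → len = n - 1 - c →
      (∃ r, reachB grid m n c r = true) →
      (∃ (cf rf : Nat), bLoop grid m (List.range' (c + 1) len)
          ((List.range m).map (reachB grid m n c)) (c : Int) = (cf : Int) ∧
          reachB grid m n cf rf = true) ∧
      (∀ c' r', reachB grid m n c' r' = true →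
        (c' : Int) ≤ bLoop grid m (List.range' (c + 1) len)
          ((List.range m).map (reachB grid m n c)) (c : Int)) := by
  intro len
  induction len with
  | zero =>
    intro c hc hlen hne
    simp only [List.range', bLoop]
    constructor
    · obtain ⟨r, hr⟩ := hne
      exact ⟨c, r, rfl, hr⟩
    · intro c' r' h
      have := reachB_col_lt hn h
      have hcn : c = n - 1 := by omega
      have hle : c' ≤ c := by omega
      exact_mod_cast hle
  | succ len ih =>
    intro c hc hlen hne
    have hc1 : c + 1 < n := by omega
    rw [List.range'_succ]
    simp only [bLoop]
    have hnew : (List.range m).map (fun r =>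
        rowOk grid m ((List.range m).map (reachB grid m n c)) (c + 1) r) =
        (List.range m).map (reachB grid m n (c + 1)) := by
      apply List.map_congr_left
      intro r hr
      exact rowOk_eq c r (List.mem_range.1 hr) hc1
    rw [hnew]
    by_cases hstep : ∃ r, reachB grid m n (c + 1) r = true
    · have hany : ((List.range m).map (reachB grid m n (c + 1))).any id = true := by
        obtain ⟨r, hr⟩ := hstep
        simp only [List.any_map, List.any_eq_true]
        exact ⟨r, List.mem_range.2 (reachB_lt_m hr), by simpa using hr⟩
      rw [if_pos hany]
      exact ih (c + 1) hc1 (by omega) hstep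
    · have hstep' : ∀ r, reachB grid m n (c + 1) r = false := by
        intro r
        by_contra hx
        exact hstep ⟨r, by simpa using hx⟩
      have hany : ((List.range m).map (reachB grid m n (c + 1))).any id = false := by
        simp only [List.any_map, List.any_eq_false]
        intro r hr
        simpa using hstep' r
      rw [if_neg (by simp [hany])]
      constructor
      · obtain ⟨r, hr⟩ := hne
        exact ⟨c, r, rfl, hr⟩
      · intro c' r' h
        by_contra hgt
        have hgt' : c < c' := by omega
        have hemp := reachB_empty_above (c := c) hstep' (c' - c - 1) r'
        rw [show c + 1 + (c' - c - 1) = c' from by omega] at hemp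
        exact absurd h (by simp [hemp])

-- ===== VERDICT (by name: the statement is the Claim_ definition above) =====
theorem maxMoves_bfs_spec : Claim_equal_maxMoves_bfs := by
  intro grid _ hpre
  obtain ⟨hn0', hrows⟩ := hpre
  unfold Spec_maxMoves_bfs
  by_cases hne : grid = []
  · subst hne
    simp [maxMoves_bfs, maxMoves_bfs_alt, bfsLoop, bLoop]
  have hn0 := hn0' hne
  set m := grid.length with hmdef
  set n := (grid.headD []).length with hndef
  have hm : 0 < m := List.length_pos_iff.2 hne
  -- the BFS result is the fold of potentials of the column-0 cells
  have hvz : (fun r c => visGet ((List.range m).map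
      (fun _ => (List.range n).map (fun _ => false))) r c) = visZ m n := by
    funext r c
    rw [visGet_init]
    rfl
  have hA : maxMoves_bfs grid =
      (List.range m).foldr (fun r acc => max (hFun grid m n (visZ m n) r 0) acc) 0 := by
    show bfsLoop grid m n _ _ 0 = _
    rw [bfsLoop_eq grid m n _ _ 0
      (by intro x hx; obtain ⟨r, _, rfl⟩ := List.mem_map.1 hx; simp) le_rfl]
    rw [List.foldr_map]
    rw [show (fun (r : Nat) (acc : Int) => max (hFun grid m n
        (visGet ((List.range m).map (fun _ => (List.range n).map (fun _ => false)))) r 0) acc) =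
      (fun (r : Nat) (acc : Int) => max (hFun grid m n (visZ m n) r 0) acc) from by
        rw [← hvz]]
  -- B's loop, rewritten through the reachability DP
  have hB : maxMoves_bfs_alt grid = bLoop grid m (List.range' 1 (n - 1))
      ((List.range m).map (reachB grid m n 0)) 0 := by
    show bLoop grid m (List.range' 1 (n - 1)) (List.replicate m true) 0 = _
    rw [map_reach0]
  have hinv := bLoop_inv grid m n hn0 (n - 1) 0 hn0 (by omega)
    ⟨0, by simp [reachB, hm]⟩
  obtain ⟨⟨cf, rf, hcf, hrf⟩, hub⟩ := hinv
  norm_num at hcf hub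
  rw [hA, hB]
  apply le_antisymm
  · apply fmax_le
    · rw [hcf]
      positivity
    · intro r hr
      have hre : reachB grid m n 0 r = true := by
        simp [reachB, List.mem_range.1 hr]
      exact hFun_le_of_reach grid m n hn0 _ hub n 0 r (by omega) hre
  · rw [hcf]
    obtain ⟨r0, hr0, hle⟩ := reach_chain grid m n hn0 cf rf hrf
    have h1 : (cf : Int) ≤ hFun grid m n (visZ m n) rf cf :=
      hFun_ge_base (visZ_false (reachB_lt_m hrf) (reachB_col_lt hn0 hrf))
    calc (cf : Int) ≤ hFun grid m n (visZ m n) rf cf := h1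
      _ ≤ hFun grid m n (visZ m n) r0 0 := hle
      _ ≤ (List.range m).foldr (fun r acc => max (hFun grid m n (visZ m n) r 0) acc) 0 :=
          le_fmax_mem _ _ (List.mem_range.2 hr0)
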